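-- pv_equiv track=rewrite | github.com/code-yeongyu/YouEye | python-demo/utils/coords.py | get_touchable_word_coord
-- ===== SOURCE A (Python) =====
-- def get_touchable_word_coord(hands, words):
--     left_hand = hands[0][0]
--     right_hand = hands[1][0]
--     top_hand = hands[0][1]
--     bottom_hand = hands[1][1]
--
--     touchable_words_pos = []
--
--     for word in words:
--         left_word = word[0][0]
--         right_word = word[1][0]
--         top_word = word[0][1]
--         bottom_word = word[1][1]
--         middle_x = int((left_word + right_word) / 2)
--         middle_y = int((top_word + bottom_word) / 2)
--         middle_dot = [middle_x, middle_y]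
--         if will_click_word_coord(left_hand, right_hand, bottom_hand, top_hand,
--                                  middle_dot):
--             touchable_words_pos.append(word)
--     return get_biggest_area(touchable_words_pos)
--
-- def will_click_word_coord(left_pos, right_pos, bottom_pos, top_pos,
--                           letter_dot):
--     DOT_RANGE = 200
--     # filter dots between left_pos and right_pos letter_dots
--     if not (left_pos <= letter_dot[0] and letter_dot[0] <= right_pos):
--         return False
--     # filter dots between top_pos and top_pos + DOT_RANGE
--     if not (top_pos - DOT_RANGE <= letter_dot[1]
--             and bottom_pos >= letter_dot[1]):
--         return False
--     return True
--
-- def get_biggest_area(dots):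
--     WEIGHT = 200
--     left = None
--     top = None
--     right = None
--     bottom = None
--     for dot in dots:
--         dot_left = dot[0][0]
--         dot_right = dot[1][0]
--         dot_top = dot[0][1]
--         dot_bottom = dot[1][1]
--         if left == None or left > dot_left:
--             left = dot_left
--         if right == None or right < dot_right:
--             right = dot_right
--         if top == None or top > dot_top:
--             top = dot_top
--         if bottom == None or bottom < dot_bottom:
--             bottom = dot_bottom
--     if left == None:
--         return []
--     left -= WEIGHT
--     if left < 0:
--         left = 0
--     top -= WEIGHT
--     if top < 0:
--         top = 0
--     p1 = (left, top)
--     p2 = (right + WEIGHT, bottom + WEIGHT)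
--     return [p1, p2]
-- ===== SOURCE B (Python) =====
-- def get_touchable_word_coord(hands, words):
--     lh, th = hands[0][0], hands[0][1]
--     rh, bh = hands[1][0], hands[1][1]
--
--     def box_of(w):
--         # optional bounding box of one word: its corners if its midpoint is touchable, else None
--         mx = int((w[0][0] + w[1][0]) / 2)
--         my = int((w[0][1] + w[1][1]) / 2)
--         if lh <= mx <= rh and th - 200 <= my <= bh:
--             return (w[0][0], w[1][0], w[0][1], w[1][1])
--         return None
--
--     def merge(x, y):
--         if x is None:
--             return y
--         if y is None:
--             return x
--         return (min(x[0], y[0]), max(x[1], y[1]), min(x[2], y[2]), max(x[3], y[3]))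
--
--     def bbox(ws):
--         # divide and conquer: merge is associative, so splitting anywhere is correct
--         if len(ws) == 1:
--             return box_of(ws[0])
--         mid = len(ws) // 2
--         return merge(bbox(ws[:mid]), bbox(ws[mid:]))
--
--     res = bbox(words) if words else None
--     if res is None:
--         return []
--     l, r, t, b = res
--     return [(max(l - 200, 0), max(t - 200, 0)), (r + 200, b + 200)]
-- ===== Notes on version B (the rewrite author's own statement) =====
-- stated objective: alternative
-- what changed: Replaces A's linear filter-then-scan (build the list of touchable words, then sweep it with four running min/max accumulators) by a divide-and-conquer recursion: each word maps to an optional box, halves of the word list are solved recursively and combined with an associative merge of optional boxes.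
import Mathlib
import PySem

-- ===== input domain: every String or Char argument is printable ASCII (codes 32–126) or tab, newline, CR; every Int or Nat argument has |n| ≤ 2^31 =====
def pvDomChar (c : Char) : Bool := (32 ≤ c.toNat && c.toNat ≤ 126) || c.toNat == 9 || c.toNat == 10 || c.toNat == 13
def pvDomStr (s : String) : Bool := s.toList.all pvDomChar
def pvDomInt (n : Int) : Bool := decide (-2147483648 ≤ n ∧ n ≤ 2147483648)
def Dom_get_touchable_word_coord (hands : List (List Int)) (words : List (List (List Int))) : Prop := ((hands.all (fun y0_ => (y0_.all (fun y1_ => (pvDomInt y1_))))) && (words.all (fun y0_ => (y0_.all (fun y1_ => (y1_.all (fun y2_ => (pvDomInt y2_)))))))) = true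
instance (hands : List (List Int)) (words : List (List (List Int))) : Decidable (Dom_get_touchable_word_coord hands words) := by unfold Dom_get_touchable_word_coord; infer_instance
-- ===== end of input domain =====

-- B replaces A's linear filter-then-scan by divide and conquer: map each word to an
-- optional box and combine halves with an associative merge (objective: alternative).

-- ===== PORT A =====
-- helper of A; letter_dot[0]/[1] ported with pyGetD: exact, callers always pass a 2-element list
def will_click_word_coord (left_pos right_pos bottom_pos top_pos : Int) (letter_dot : List Int) : Bool :=
  if ¬ (left_pos ≤ PySem.List.pyGetD letter_dot 0 0 ∧ PySem.List.pyGetD letter_dot 0 0 ≤ right_pos) then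
    false
  else if ¬ (top_pos - 200 ≤ PySem.List.pyGetD letter_dot 1 0 ∧ bottom_pos ≥ PySem.List.pyGetD letter_dot 1 0) then
    false
  else true

-- the body of get_biggest_area's for-loop, named so proofs can speak about it; state = (left, top, right, bottom)
def pvBigStep (s : Option Int × Option Int × Option Int × Option Int) (dot : List (List Int)) :
    Option Int × Option Int × Option Int × Option Int :=
  -- dot[0][0] etc. ported with pyGetD: exact under Pre_ (every dot is a word of the required shape)
  let dot_left := PySem.List.pyGetD (PySem.List.pyGetD dot 0 []) 0 0
  let dot_right := PySem.List.pyGetD (PySem.List.pyGetD dot 1 []) 0 0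
  let dot_top := PySem.List.pyGetD (PySem.List.pyGetD dot 0 []) 1 0
  let dot_bottom := PySem.List.pyGetD (PySem.List.pyGetD dot 1 []) 1 0
  let left := match s.1 with
    | none => some dot_left
    | some l => if l > dot_left then some dot_left else some l
  let right := match s.2.2.1 with
    | none => some dot_right
    | some r => if r < dot_right then some dot_right else some r
  let top := match s.2.1 with
    | none => some dot_top
    | some t => if t > dot_top then some dot_top else some t
  let bottom := match s.2.2.2 with
    | none => some dot_bottom
    | some b => if b < dot_bottom then some dot_bottom else some b
  (left, top, right, bottom)

def get_biggest_area (dots : List (List (List Int))) : List (Int × Int) :=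
  let st := dots.foldl pvBigStep (none, none, none, none)
  match st.1 with
  | none => []
  | some left =>
    -- when left is set, top/right/bottom are set too (the loop sets all four together),
    -- so the .getD defaults are unreachable
    let left := left - 200
    let left := if left < 0 then 0 else left
    let top := (st.2.1).getD 0 - 200
    let top := if top < 0 then 0 else top
    [(left, top), ((st.2.2.1).getD 0 + 200, (st.2.2.2).getD 0 + 200)]

def get_touchable_word_coord (hands : List (List Int)) (words : List (List (List Int))) : List (Int × Int) :=
  -- hands[i][j] / word[i][j] ported with pyGetD: exact under Pre_ (shapes in range)
  let left_hand := PySem.List.pyGetD (PySem.List.pyGetD hands 0 []) 0 0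
  let right_hand := PySem.List.pyGetD (PySem.List.pyGetD hands 1 []) 0 0
  let top_hand := PySem.List.pyGetD (PySem.List.pyGetD hands 0 []) 1 0
  let bottom_hand := PySem.List.pyGetD (PySem.List.pyGetD hands 1 []) 1 0
  let touchable_words_pos := words.foldl (fun acc word =>
    let left_word := PySem.List.pyGetD (PySem.List.pyGetD word 0 []) 0 0
    let right_word := PySem.List.pyGetD (PySem.List.pyGetD word 1 []) 0 0
    let top_word := PySem.List.pyGetD (PySem.List.pyGetD word 0 []) 1 0
    let bottom_word := PySem.List.pyGetD (PySem.List.pyGetD word 1 []) 1 0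
    -- int((a+b)/2): Python truncates toward zero; Int.tdiv is truncating division (exact on Dom)
    let middle_x := Int.tdiv (left_word + right_word) 2
    let middle_y := Int.tdiv (top_word + bottom_word) 2
    let middle_dot := [middle_x, middle_y]
    if will_click_word_coord left_hand right_hand bottom_hand top_hand middle_dot then
      acc ++ [word]
    else acc) []
  get_biggest_area touchable_words_pos

-- ===== PORT B =====
-- B's box_of: the word's corners if its midpoint is touchable, else None
def pvBoxOf (lh rh th bh : Int) (w : List (List Int)) : Option (Int × Int × Int × Int) :=
  let mx := Int.tdiv (PySem.List.pyGetD (PySem.List.pyGetD w 0 []) 0 0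
                     + PySem.List.pyGetD (PySem.List.pyGetD w 1 []) 0 0) 2
  let my := Int.tdiv (PySem.List.pyGetD (PySem.List.pyGetD w 0 []) 1 0
                     + PySem.List.pyGetD (PySem.List.pyGetD w 1 []) 1 0) 2
  if lh ≤ mx ∧ mx ≤ rh ∧ th - 200 ≤ my ∧ my ≤ bh then
    some (PySem.List.pyGetD (PySem.List.pyGetD w 0 []) 0 0,
          PySem.List.pyGetD (PySem.List.pyGetD w 1 []) 0 0,
          PySem.List.pyGetD (PySem.List.pyGetD w 0 []) 1 0,
          PySem.List.pyGetD (PySem.List.pyGetD w 1 []) 1 0)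
  else none

-- B's merge of two optional boxes
def pvMerge : Option (Int × Int × Int × Int) → Option (Int × Int × Int × Int) → Option (Int × Int × Int × Int)
  | none, y => y
  | some x, none => some x
  | some (l1, r1, t1, b1), some (l2, r2, t2, b2) =>
      some (min l1 l2, max r1 r2, min t1 t2, max b1 b2)

-- B's divide-and-conquer bbox; Python slices ws[:mid]/ws[mid:] become take/drop.
-- (Python never calls bbox on []; the [] branch here only makes the recursion total.)
def pvBbox (lh rh th bh : Int) (ws : List (List (List Int))) : Option (Int × Int × Int × Int) :=
  match h : ws with
  | [] => none
  | [w] => pvBoxOf lh rh th bh w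
  | _ :: _ :: _ =>
    let mid := ws.length / 2
    pvMerge (pvBbox lh rh th bh (ws.take mid)) (pvBbox lh rh th bh (ws.drop mid))
  termination_by ws.length
  decreasing_by
    · subst h; simp [List.length_take]; omega
    · subst h; simp [List.length_drop]; omega

def get_touchable_word_coord_alt (hands : List (List Int)) (words : List (List (List Int))) : List (Int × Int) :=
  let lh := PySem.List.pyGetD (PySem.List.pyGetD hands 0 []) 0 0
  let th := PySem.List.pyGetD (PySem.List.pyGetD hands 0 []) 1 0
  let rh := PySem.List.pyGetD (PySem.List.pyGetD hands 1 []) 0 0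
  let bh := PySem.List.pyGetD (PySem.List.pyGetD hands 1 []) 1 0
  match (if words = [] then none else pvBbox lh rh th bh words) with
  | none => []
  | some (l, r, t, b) => [(max (l - 200) 0, max (t - 200) 0), (r + 200, b + 200)]

-- ===== PRECONDITION & SPEC =====
-- Pre_ = exactly the shapes on which A's subscripts hands[0][j], hands[1][j], word[0][j], word[1][j] (j<2) are in range; elsewhere A raises IndexError
def Pre_get_touchable_word_coord (hands : List (List Int)) (words : List (List (List Int))) : Prop :=
  2 ≤ hands.length ∧ 2 ≤ (hands.getD 0 []).length ∧ 2 ≤ (hands.getD 1 []).length ∧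
  ∀ w ∈ words, 2 ≤ w.length ∧ 2 ≤ (w.getD 0 []).length ∧ 2 ≤ (w.getD 1 []).length
instance (hands : List (List Int)) (words : List (List (List Int))) : Decidable (Pre_get_touchable_word_coord hands words) := by unfold Pre_get_touchable_word_coord; infer_instance

def pvWitness_get_touchable_word_coord : List (List Int) × List (List (List Int)) :=
  ([[0, 0], [1000, 1000]], [[[10, 10], [20, 20]], [[5000, 5000], [6000, 6000]]])

def Spec_get_touchable_word_coord (hands : List (List Int)) (words : List (List (List Int))) (out : List (Int × Int)) : Prop := out = get_touchable_word_coord_alt hands words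
instance (hands : List (List Int)) (words : List (List (List Int))) (out : List (Int × Int)) : Decidable (Spec_get_touchable_word_coord hands words out) := by unfold Spec_get_touchable_word_coord; infer_instance

-- ===== CLAIM (what is proved, stated in full; the proofs are below) =====
def Claim_equal_get_touchable_word_coord : Prop := ∀ (hands : List (List Int)) (words : List (List (List Int))), Dom_get_touchable_word_coord hands words → Pre_get_touchable_word_coord hands words → Spec_get_touchable_word_coord hands words (get_touchable_word_coord hands words)

-- ===== LEMMAS AND PROOFS =====

-- pvMerge is associative with identity none
lemma pvMerge_none_right (x : Option (Int × Int × Int × Int)) : pvMerge x none = x := by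
  cases x <;> rfl

lemma pvMerge_assoc (x y z : Option (Int × Int × Int × Int)) :
    pvMerge (pvMerge x y) z = pvMerge x (pvMerge y z) := by
  cases x <;> cases y <;> cases z <;> simp [pvMerge]

-- folding merge∘box_of from any accumulator peels the accumulator off
lemma pvFold_merge (lh rh th bh : Int) (ws : List (List (List Int)))
    (x : Option (Int × Int × Int × Int)) :
    ws.foldl (fun a w => pvMerge a (pvBoxOf lh rh th bh w)) x
      = pvMerge x (ws.foldl (fun a w => pvMerge a (pvBoxOf lh rh th bh w)) none) := by
  induction ws generalizing x with
  | nil => simp [pvMerge_none_right]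
  | cons w ws ih =>
    simp only [List.foldl_cons]
    rw [ih (pvMerge x (pvBoxOf lh rh th bh w)), ih (pvMerge none (pvBoxOf lh rh th bh w)),
        pvMerge_assoc]
    rfl

-- divide and conquer equals the linear left fold
lemma pvBbox_eq_foldl (lh rh th bh : Int) (ws : List (List (List Int))) :
    pvBbox lh rh th bh ws = ws.foldl (fun a w => pvMerge a (pvBoxOf lh rh th bh w)) none := by
  fun_induction pvBbox lh rh th bh ws with
  | case1 => rfl
  | case2 w => simp [List.foldl_cons, pvMerge]
  | case3 =>
    rename_i ih1 ih2
    dsimp only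
    rw [ih1, ih2, ← pvFold_merge, ← List.foldl_append, List.take_append_drop]

-- A's accumulator rendered from B's optional box (l, r, t, b) ↦ (left, top, right, bottom)
def pvToS : Option (Int × Int × Int × Int) → Option Int × Option Int × Option Int × Option Int
  | none => (none, none, none, none)
  | some (l, r, t, b) => (some l, some t, some r, some b)

lemma pyGetD_pair_zero (a b d : Int) : PySem.List.pyGetD [a, b] 0 d = a := by
  simp [PySem.List.pyGetD]

lemma pyGetD_pair_one (a b d : Int) : PySem.List.pyGetD [a, b] 1 d = b := by
  simp [PySem.List.pyGetD]

lemma pvStep_rel (lh rh th bh : Int) (s : Option (Int × Int × Int × Int)) (w : List (List Int)) :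
    (if will_click_word_coord lh rh bh th
        [Int.tdiv (PySem.List.pyGetD (PySem.List.pyGetD w 0 []) 0 0
                  + PySem.List.pyGetD (PySem.List.pyGetD w 1 []) 0 0) 2,
         Int.tdiv (PySem.List.pyGetD (PySem.List.pyGetD w 0 []) 1 0
                  + PySem.List.pyGetD (PySem.List.pyGetD w 1 []) 1 0) 2] = true then
       pvBigStep (pvToS s) w
     else pvToS s) = pvToS (pvMerge s (pvBoxOf lh rh th bh w)) := by
  simp only [will_click_word_coord, pvBoxOf, pvBigStep, pyGetD_pair_zero, pyGetD_pair_one]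
  generalize PySem.List.pyGetD (PySem.List.pyGetD w 0 []) 0 0 = x0
  generalize PySem.List.pyGetD (PySem.List.pyGetD w 1 []) 0 0 = x1
  generalize PySem.List.pyGetD (PySem.List.pyGetD w 0 []) 1 0 = y0
  generalize PySem.List.pyGetD (PySem.List.pyGetD w 1 []) 1 0 = y1
  cases s with
  | none =>
    simp only [pvToS]
    split_ifs <;> simp_all [pvMerge]
  | some p =>
    obtain ⟨l, r, t, b⟩ := p
    simp only [pvToS]
    split_ifs <;> simp_all [pvMerge, min_def, max_def, Prod.ext_iff] <;> omega

lemma pvFold_rel (lh rh th bh : Int) (ws : List (List (List Int))) (s : Option (Int × Int × Int × Int)) :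
    (ws.foldl (fun acc w =>
        if will_click_word_coord lh rh bh th
            [Int.tdiv (PySem.List.pyGetD (PySem.List.pyGetD w 0 []) 0 0
                      + PySem.List.pyGetD (PySem.List.pyGetD w 1 []) 0 0) 2,
             Int.tdiv (PySem.List.pyGetD (PySem.List.pyGetD w 0 []) 1 0
                      + PySem.List.pyGetD (PySem.List.pyGetD w 1 []) 1 0) 2] = true
        then pvBigStep acc w else acc) (pvToS s))
      = pvToS (ws.foldl (fun a w => pvMerge a (pvBoxOf lh rh th bh w)) s) := by
  induction ws generalizing s with
  | nil => rfl
  | cons w ws ih =>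
    simp only [List.foldl_cons]
    rw [pvStep_rel lh rh th bh s w]
    exact ih _

-- folding pvBigStep over A's filtered list is the fused fold with the test inside
lemma pvFilterFold (p : List (List Int) → Bool) (ws : List (List (List Int)))
    (st : Option Int × Option Int × Option Int × Option Int) :
    (ws.filter p).foldl pvBigStep st
      = ws.foldl (fun acc w => if p w = true then pvBigStep acc w else acc) st := by
  induction ws generalizing st with
  | nil => rfl
  | cons w ws ih =>
    by_cases h : p w = true <;> simp [h, ih]

-- B skips pvBbox on []; on non-[] input pvBbox already computes the fold from none
lemma pvGuard_eq (lh rh th bh : Int) (ws : List (List (List Int))) :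
    (if ws = [] then none else pvBbox lh rh th bh ws)
      = ws.foldl (fun a w => pvMerge a (pvBoxOf lh rh th bh w)) none := by
  split_ifs with h
  · subst h; rfl
  · exact pvBbox_eq_foldl lh rh th bh ws

-- ===== VERDICT (by name: the statement is the Claim_ definition above) =====
theorem get_touchable_word_coord_spec : Claim_equal_get_touchable_word_coord := by
  intro hands words _ _
  unfold Spec_get_touchable_word_coord get_touchable_word_coord get_touchable_word_coord_alt
  simp only
  rw [PySem.List.foldl_append_if_eq_filter]
  simp only [List.nil_append, get_biggest_area]
  rw [pvFilterFold, pvGuard_eq]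
  rw [show ((none, none, none, none) : Option Int × Option Int × Option Int × Option Int) = pvToS none from rfl,
     pvFold_rel]
  cases h : List.foldl (fun a w => pvMerge a (pvBoxOf _ _ _ _ w)) none words with
  | none => simp [pvToS]
  | some p =>
    obtain ⟨l, r, t, b⟩ := p
    simp only [pvToS, Option.getD_some]
    split_ifs <;> simp_all <;> omega
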